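-- pv_equiv track=rewrite | github.com/kelpasa/Code_Wars_Python | 6 кю/Find Added.py | findAdded
-- ===== SOURCE A (Python) =====
-- def findAdded(st1, st2):
--     x = list(st2)
--     for i in st1:
--         if i not in x:
--             pass
--         else:
--             x.remove(i)
--     return ''.join(sorted(x))
-- ===== SOURCE B (Python) =====
-- def findAdded(st1, st2):
--     # Two-pointer merge over the two sorted char lists: emit st2's excess, already sorted.
--     s1 = sorted(st1)
--     s2 = sorted(st2)
--     out = []
--     i = j = 0
--     while i < len(s2) and j < len(s1):
--         if s2[i] < s1[j]:
--             out.append(s2[i])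
--             i += 1
--         elif s2[i] == s1[j]:
--             i += 1
--             j += 1
--         else:
--             j += 1
--     out.extend(s2[i:])
--     return ''.join(out)
-- ===== Notes on version B (the rewrite author's own statement) =====
-- stated objective: faster
-- what changed: Replaces the per-character list.remove scans over a mutable copy of st2 with sorting both strings once and a single two-pointer merge pass that emits st2's excess characters already in order.
import Mathlib
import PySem

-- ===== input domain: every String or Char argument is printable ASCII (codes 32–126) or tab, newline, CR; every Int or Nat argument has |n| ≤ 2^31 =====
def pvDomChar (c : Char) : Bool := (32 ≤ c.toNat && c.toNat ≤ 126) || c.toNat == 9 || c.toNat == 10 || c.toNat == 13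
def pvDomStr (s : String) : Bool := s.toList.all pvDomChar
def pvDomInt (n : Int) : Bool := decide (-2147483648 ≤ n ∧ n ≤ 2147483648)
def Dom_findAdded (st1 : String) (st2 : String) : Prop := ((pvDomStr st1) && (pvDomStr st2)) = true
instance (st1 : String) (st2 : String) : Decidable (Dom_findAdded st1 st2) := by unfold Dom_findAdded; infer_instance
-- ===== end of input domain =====

-- B replaces A's per-character list.remove scans with a single two-pointer merge of the two sorted strings (faster; return value only, A never mutates its arguments).

-- ===== PORT A =====
-- x = list(st2); for i in st1: if i not in x: pass else: x.remove(i); return ''.join(sorted(x))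
def findAdded (st1 : String) (st2 : String) : String :=
  let x := st2.toList
  let x := st1.toList.foldl (fun x i =>
    if i ∉ x then x
    else (PySem.List.remove? x i).getD x) x
  String.ofList (PySem.List.sorted x (fun c => c) false)

-- ===== PORT B =====
-- the while loop of Source B: two pointers over the two sorted lists, emitting st2's excess
def mergeDiff : List Char → List Char → List Char
  | xs, [] => xs
  | [], _ :: _ => []
  | a :: xs, b :: ys =>
    if a < b then a :: mergeDiff xs (b :: ys)
    else if a = b then mergeDiff xs ys
    else mergeDiff (a :: xs) ys
  termination_by xs ys => xs.length + ys.length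

def findAdded_alt (st1 : String) (st2 : String) : String :=
  let s1 := PySem.List.sorted st1.toList (fun c => c) false
  let s2 := PySem.List.sorted st2.toList (fun c => c) false
  String.ofList (mergeDiff s2 s1)

-- ===== PRECONDITION & SPEC =====
def Spec_findAdded (st1 : String) (st2 : String) (out : String) : Prop := out = findAdded_alt st1 st2
instance (st1 : String) (st2 : String) (out : String) : Decidable (Spec_findAdded st1 st2 out) := by unfold Spec_findAdded; infer_instance

-- ===== CLAIM (what is proved, stated in full; the proofs are below) =====
def Claim_equal_findAdded : Prop := ∀ (st1 : String) (st2 : String), Dom_findAdded st1 st2 → Spec_findAdded st1 st2 (findAdded st1 st2)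

-- ===== LEMMAS AND PROOFS =====

-- A's loop body is exactly List.erase
theorem eraseStep_eq (x : List Char) (i : Char) :
    (if i ∉ x then x else (PySem.List.remove? x i).getD x) = x.erase i := by
  by_cases h : i ∈ x
  · simp [h, PySem.List.remove?_eq_some_erase x i h]
  · simp [h, List.erase_of_not_mem h]

theorem foldl_erase_nil (ys : List Char) :
    ys.foldl List.erase ([] : List Char) = [] := by
  induction ys with
  | nil => rfl
  | cons y ys ih => simpa using ih

theorem foldl_erase_cons_of_forall_ne (a : Char) (l ys : List Char)
    (h : ∀ y ∈ ys, a ≠ y) :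
    ys.foldl List.erase (a :: l) = a :: ys.foldl List.erase l := by
  induction ys generalizing l with
  | nil => rfl
  | cons y ys ih =>
    have hne : a ≠ y := h y (by simp)
    have : (a :: l).erase y = a :: l.erase y := by
      rw [List.erase_cons_tail]; simp [hne]
    simp only [List.foldl_cons, this]
    exact ih (l.erase y) (fun z hz => h z (by simp [hz]))

theorem foldl_erase_pairwise (ys : List Char) (xs : List Char)
    (h : xs.Pairwise (· ≤ ·)) :
    (ys.foldl List.erase xs).Pairwise (· ≤ ·) := by
  induction ys generalizing xs with
  | nil => exact h
  | cons y ys ih =>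
    exact ih _ (List.Pairwise.sublist (List.erase_sublist) h)

theorem foldl_erase_perm_left (ys : List Char) (l l' : List Char)
    (h : l.Perm l') :
    (ys.foldl List.erase l).Perm (ys.foldl List.erase l') := by
  induction ys generalizing l l' with
  | nil => exact h
  | cons y ys ih => exact ih _ _ (h.erase y)

theorem foldl_erase_perm_right (ys ys' : List Char) (h : ys.Perm ys') (l : List Char) :
    ys.foldl List.erase l = ys'.foldl List.erase l := by
  induction h generalizing l with
  | nil => rfl
  | cons y _ ih => simpa using ih (l.erase y)
  | swap x y _ => simp [List.erase_comm]
  | trans _ _ ih₁ ih₂ => exact (ih₁ l).trans (ih₂ l)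

theorem mergeDiff_eq (xs ys : List Char)
    (hx : xs.Pairwise (· ≤ ·)) (hy : ys.Pairwise (· ≤ ·)) :
    mergeDiff xs ys = ys.foldl List.erase xs := by
  induction xs, ys using mergeDiff.induct with
  | case1 xs => simp [mergeDiff]
  | case2 b ys => simp [mergeDiff, foldl_erase_nil]
  | case3 a xs b ys hab ih =>
    have hx' := List.Pairwise.of_cons hx
    rw [mergeDiff]
    simp only [hab, if_pos]
    rw [ih hx' hy]
    rw [foldl_erase_cons_of_forall_ne a xs (b :: ys)]
    intro y hyy
    rcases List.mem_cons.mp hyy with rfl | hmem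
    · exact ne_of_lt hab
    · have hb : b ≤ y := (List.pairwise_cons.mp hy).1 y hmem
      exact ne_of_lt (lt_of_lt_of_le hab hb)
  | case4 xs b ys hnb ih =>
    rw [mergeDiff]
    simp only [hnb, if_false]
    rw [ih (List.Pairwise.of_cons hx) (List.Pairwise.of_cons hy)]
    simp [List.erase_cons_head]
  | case5 a xs b ys hab hne ih =>
    rw [mergeDiff]
    rw [if_neg hab, if_neg hne]
    rw [ih hx (List.Pairwise.of_cons hy)]
    have hba : b < a := by
      rcases lt_trichotomy a b with h | h | h
      · exact absurd h hab
      · exact absurd h hne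
      · exact h
    have hnotmem : b ∉ a :: xs := by
      intro hmem
      rcases List.mem_cons.mp hmem with rfl | hmem
      · exact lt_irrefl b hba
      · have : a ≤ b := (List.pairwise_cons.mp hx).1 b hmem
        exact absurd (lt_of_lt_of_le hba this) (not_lt.mpr le_rfl)
    simp [List.erase_of_not_mem hnotmem]

theorem core_eq (s1 s2 : List Char) :
    mergeDiff (PySem.List.sorted s2 (fun c => c) false)
              (PySem.List.sorted s1 (fun c => c) false)
      = PySem.List.sorted (s1.foldl List.erase s2) (fun c => c) false := by
  have hx : (PySem.List.sorted s2 (fun c => c) false).Pairwise (· ≤ ·) :=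
    PySem.List.sorted_pairwise s2 (fun c => c)
  have hy : (PySem.List.sorted s1 (fun c => c) false).Pairwise (· ≤ ·) :=
    PySem.List.sorted_pairwise s1 (fun c => c)
  rw [mergeDiff_eq _ _ hx hy]
  rw [foldl_erase_perm_right _ s1 (PySem.List.sorted_perm s1 (fun c => c) false)]
  symm
  apply PySem.List.sorted_id_eq_of_perm_of_pairwise
  · exact (foldl_erase_perm_left s1 _ s2 (PySem.List.sorted_perm s2 (fun c => c) false))
  · exact foldl_erase_pairwise s1 _ hx

-- ===== VERDICT (by name: the statement is the Claim_ definition above) =====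
theorem findAdded_spec : Claim_equal_findAdded := by
  intro st1 st2 _
  unfold Spec_findAdded findAdded findAdded_alt
  have hstep : (fun (x : List Char) (i : Char) =>
      if i ∉ x then x else (PySem.List.remove? x i).getD x) = List.erase := by
    funext x i; exact eraseStep_eq x i
  simp only [hstep]
  rw [core_eq]
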